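-- pv_equiv track=rewrite | github.com/rx10/AoC-2024 | 5.py | diagonal_traversal
-- ===== SOURCE A (Python) =====
-- def diagonal_traversal(grid: list[str]) -> list[str]:
--     if (len(grid) == 0 or len(grid[0]) == 0):
--         return []
--     rows = len(grid)
--     cols = len(grid[0])
--     diagonals = []
--     for k in range(-(rows - 1), cols):
--         diag = []
--         for r in range(rows):
--             c = r + k
--             if 0 <= c < cols:
--                 diag.append(grid[r][c])
--         diagonals.append(diag)
--     for k in range(rows + cols - 1):
--         diag = []
--         for r in range(rows):
--             c = k - r
--             if 0 <= c < cols: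
--                 diag.append(grid[r][c])
--         diagonals.append(diag)
--     return diagonals
-- ===== SOURCE B (Python) =====
-- def diagonal_traversal(grid: list[str]) -> list[str]:
--     # One pass over all cells, grouping each character into its two diagonals
--     # (keyed by c - r and r + c) in dicts, instead of scanning every row once
--     # per diagonal.
--     if (len(grid) == 0 or len(grid[0]) == 0):
--         return []
--     rows = len(grid)
--     cols = len(grid[0])
--     down = {}
--     up = {}
--     for r in range(rows):
--         for c in range(cols):
--             ch = grid[r][c]
--             down.setdefault(c - r, []).append(ch)
--             up.setdefault(r + c, []).append(ch)
--     return [down.get(k, []) for k in range(-(rows - 1), cols)] + \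
--            [up.get(k, []) for k in range(rows + cols - 1)]
-- ===== Notes on version B (the rewrite author's own statement) =====
-- stated objective: faster
-- what changed: B replaces A's per-diagonal scan of every row (once for each of the 2*(rows+cols-1) diagonals) by a single pass over the grid's cells that buckets each character into two dicts keyed by c-r and r+c, then reads the buckets off in A's key order.
import Mathlib
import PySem

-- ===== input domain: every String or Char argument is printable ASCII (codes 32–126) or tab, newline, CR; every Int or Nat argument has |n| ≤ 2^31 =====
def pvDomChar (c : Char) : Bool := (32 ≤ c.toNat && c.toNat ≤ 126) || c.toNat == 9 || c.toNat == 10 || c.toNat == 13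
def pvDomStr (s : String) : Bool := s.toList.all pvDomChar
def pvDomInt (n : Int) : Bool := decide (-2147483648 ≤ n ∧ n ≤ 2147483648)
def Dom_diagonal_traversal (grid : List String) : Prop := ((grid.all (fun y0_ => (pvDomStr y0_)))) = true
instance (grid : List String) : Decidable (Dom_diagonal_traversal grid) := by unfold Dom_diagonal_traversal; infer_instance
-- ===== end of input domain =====

-- B makes ONE pass over the grid's cells, bucketing each character into its two diagonals
-- (dicts keyed by c-r and r+c), instead of A's scan of every row once per diagonal;
-- return values are identical.

-- shared cell access: grid[r][c] as a one-character string; the `none` branch is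
-- unreachable under Pre_ (it is exactly where Python raises IndexError)
def pvCell (grid : List String) (r c : Int) : String :=
  match PySem.Str.pyGet? (PySem.List.pyGetD grid r "") c with
  | some ch => String.ofList [ch]
  | none => ""

-- ===== PORT A =====
def diagonal_traversal (grid : List String) : List (List String) :=
  if grid.length = 0 ∨ (grid.headD "").toList.length = 0 then []
  else
    let rows : Int := grid.length
    let cols : Int := (grid.headD "").toList.length
    let d1 :=
      (PySem.List.pyRange (-(rows - 1)) cols 1).foldl (fun diagonals k =>
        diagonals ++
          [(PySem.List.pyRange 0 rows 1).foldl (fun diag r =>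
            if 0 ≤ r + k ∧ r + k < cols then diag ++ [pvCell grid r (r + k)] else diag) []]) []
    (PySem.List.pyRange 0 (rows + cols - 1) 1).foldl (fun diagonals k =>
      diagonals ++
        [(PySem.List.pyRange 0 rows 1).foldl (fun diag r =>
          if 0 ≤ k - r ∧ k - r < cols then diag ++ [pvCell grid r (k - r)] else diag) []]) d1

-- ===== PORT B =====
-- `down.setdefault(key, []).append(ch)` is exactly `down[key] = down.get(key, []) + [ch]`,
-- i.e. PySem.Dict.modify key [] (· ++ [ch]); `down.get(k, [])` is getD.
def diagonal_traversal_alt (grid : List String) : List (List String) :=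
  if grid.length = 0 ∨ (grid.headD "").toList.length = 0 then []
  else
    let rows : Int := grid.length
    let cols : Int := (grid.headD "").toList.length
    let du :=
      (PySem.List.pyRange 0 rows 1).foldl (fun st r =>
        (PySem.List.pyRange 0 cols 1).foldl (fun st c =>
          let ch := pvCell grid r c
          (st.1.modify (c - r) [] (· ++ [ch]), st.2.modify (r + c) [] (· ++ [ch]))) st)
        ((PySem.Dict.empty : PySem.Dict Int (List String)),
         (PySem.Dict.empty : PySem.Dict Int (List String)))
    (PySem.List.pyRange (-(rows - 1)) cols 1).map (fun k => du.1.getD k []) ++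
      (PySem.List.pyRange 0 (rows + cols - 1) 1).map (fun k => du.2.getD k [])

-- ===== PRECONDITION & SPEC =====
-- Pre_ excludes exactly the ragged grids on which Python A (and B) raise IndexError:
-- some row shorter than the first row, so grid[r][c] with 0 <= c < len(grid[0]) fails.
def Pre_diagonal_traversal (grid : List String) : Prop :=
  ∀ s ∈ grid, (grid.headD "").toList.length ≤ s.toList.length
instance (grid : List String) : Decidable (Pre_diagonal_traversal grid) := by
  unfold Pre_diagonal_traversal; infer_instance

def pvWitness_diagonal_traversal : List String := ["abc", "def"]

def Spec_diagonal_traversal (grid : List String) (out : List (List String)) : Prop := out = diagonal_traversal_alt grid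
instance (grid : List String) (out : List (List String)) : Decidable (Spec_diagonal_traversal grid out) := by unfold Spec_diagonal_traversal; infer_instance

-- ===== CLAIM (what is proved, stated in full; the proofs are below) =====
def Claim_equal_diagonal_traversal : Prop := ∀ (grid : List String), Dom_diagonal_traversal grid → Pre_diagonal_traversal grid → Spec_diagonal_traversal grid (diagonal_traversal grid)

-- ===== LEMMAS AND PROOFS =====

-- A's inner loop with an `ite` on a decidable Prop, as a filter-then-map
theorem foldl_append_ite {α β : Type} (P : α → Prop) [DecidablePred P] (f : α → β)
    (l : List α) (acc : List β) :
    l.foldl (fun acc x => if P x then acc ++ [f x] else acc) acc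
      = acc ++ (l.filter (fun x => decide (P x))).map f := by
  simpa using PySem.List.foldl_append_if (fun x => decide (P x)) f l acc

-- the dual loop shape on B's side: keep x's image exactly when P x holds
theorem flatMap_ite_singleton {α β : Type} (P : α → Prop) [DecidablePred P] (f : α → β)
    (l : List α) :
    (l.flatMap fun x => if P x then [f x] else []) = (l.filter (fun x => decide (P x))).map f := by
  induction l with
  | nil => rfl
  | cons h t ih => by_cases hp : P h <;> simp [hp, ih]

-- filtering a unit-step range by membership in [lo, hi) is the clipped range
theorem filter_pyRange_band (lo hi : Int) :
    ∀ (n : Nat) (a b : Int), (b - a).toNat = n →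
      (PySem.List.pyRange a b 1).filter (fun r => decide (lo ≤ r ∧ r < hi))
        = PySem.List.pyRange (max a lo) (min b hi) 1 := by
  intro n
  induction n with
  | zero =>
    intro a b h
    rw [PySem.List.pyRange_one_eq_nil (by omega), PySem.List.pyRange_one_eq_nil (by omega)]
    rfl
  | succ m ih =>
    intro a b h
    have hab : a < b := by omega
    rw [PySem.List.pyRange_one_cons hab, List.filter_cons, ih (a + 1) b (by omega)]
    by_cases hP : lo ≤ a ∧ a < hi
    · rw [if_pos (by simpa using hP)]
      have h2 : max (a + 1) lo = a + 1 := by omega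
      have h1 : max a lo = a := by omega
      rw [h2, h1]
      exact (PySem.List.pyRange_one_cons (by omega)).symm
    · rw [if_neg (by simpa using hP)]
      by_cases hhi : hi ≤ a
      · rw [PySem.List.pyRange_one_eq_nil (by omega), PySem.List.pyRange_one_eq_nil (by omega)]
      · have : max (a + 1) lo = max a lo := by omega
        rw [this]

-- filtering a unit-step range from 0 for a single value t keeps [t] iff 0 ≤ t < cols
theorem filter_pyRange_single (cols t : Int) :
    (PySem.List.pyRange 0 cols 1).filter (fun c => decide (c = t))
      = if 0 ≤ t ∧ t < cols then [t] else [] := by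
  rw [List.filter_congr (q := fun c => decide (t ≤ c ∧ c < t + 1))
        (by intro c _; simp only [decide_eq_decide]; omega)]
  rw [filter_pyRange_band t (t + 1) (cols - 0).toNat 0 cols rfl]
  split_ifs with h
  · have h1 : max 0 t = t := by omega
    have h2 : min cols (t + 1) = t + 1 := by omega
    rw [h1, h2, PySem.List.pyRange_one_cons (by omega),
      PySem.List.pyRange_one_eq_nil (by omega)]
  · exact PySem.List.pyRange_one_eq_nil (by omega)

-- B's single loop with a pair of independent dict accumulators is two loops
theorem pair_fold_split (grid : List String) (rows cols : Int) :
    (PySem.List.pyRange 0 rows 1).foldl (fun st r =>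
        (PySem.List.pyRange 0 cols 1).foldl (fun st c =>
          let ch := pvCell grid r c
          (st.1.modify (c - r) [] (· ++ [ch]), st.2.modify (r + c) [] (· ++ [ch]))) st)
      ((PySem.Dict.empty : PySem.Dict Int (List String)),
       (PySem.Dict.empty : PySem.Dict Int (List String)))
    = ((PySem.List.pyRange 0 rows 1).foldl (fun d r =>
          (PySem.List.pyRange 0 cols 1).foldl
            (fun d c => d.modify (c - r) [] (· ++ [pvCell grid r c])) d) PySem.Dict.empty,
       (PySem.List.pyRange 0 rows 1).foldl (fun d r =>
          (PySem.List.pyRange 0 cols 1).foldl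
            (fun d c => d.modify (r + c) [] (· ++ [pvCell grid r c])) d) PySem.Dict.empty) := by
  have h : ∀ (st : PySem.Dict Int (List String) × PySem.Dict Int (List String)) (r : Int),
      (PySem.List.pyRange 0 cols 1).foldl (fun st c =>
          let ch := pvCell grid r c
          (st.1.modify (c - r) [] (· ++ [ch]), st.2.modify (r + c) [] (· ++ [ch]))) st
      = ((PySem.List.pyRange 0 cols 1).foldl
            (fun d c => d.modify (c - r) [] (· ++ [pvCell grid r c])) st.1,
         (PySem.List.pyRange 0 cols 1).foldl
            (fun d c => d.modify (r + c) [] (· ++ [pvCell grid r c])) st.2) := by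
    intro st r
    rw [← Prod.mk.eta (p := st)]
    exact PySem.List.foldl_prod_mk
      (fun d c => d.modify (c - r) [] (· ++ [pvCell grid r c]))
      (fun d c => d.modify (r + c) [] (· ++ [pvCell grid r c])) _ st.1 st.2
  have hfun : (fun (st : PySem.Dict Int (List String) × PySem.Dict Int (List String)) (r : Int) =>
      (PySem.List.pyRange 0 cols 1).foldl (fun st c =>
          let ch := pvCell grid r c
          (st.1.modify (c - r) [] (· ++ [ch]), st.2.modify (r + c) [] (· ++ [ch]))) st)
    = (fun st r =>
      ((PySem.List.pyRange 0 cols 1).foldl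
          (fun d c => d.modify (c - r) [] (· ++ [pvCell grid r c])) st.1,
       (PySem.List.pyRange 0 cols 1).foldl
          (fun d c => d.modify (r + c) [] (· ++ [pvCell grid r c])) st.2)) :=
    funext fun st => funext fun r => h st r
  rw [hfun]
  exact PySem.List.foldl_prod_mk
    (fun (d : PySem.Dict Int (List String)) (r : Int) => (PySem.List.pyRange 0 cols 1).foldl
        (fun d c => d.modify (c - r) [] (· ++ [pvCell grid r c])) d)
    (fun (d : PySem.Dict Int (List String)) (r : Int) => (PySem.List.pyRange 0 cols 1).foldl
        (fun d c => d.modify (r + c) [] (· ++ [pvCell grid r c])) d) _ _ _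

-- a row's slice of B's "down" bucket k: the single cell (r, r+k) when it is in range
theorem row_slice_down (grid : List String) (cols r k : Int) :
    ((((PySem.List.pyRange 0 cols 1).map (fun c => (c - r, pvCell grid r c))).filter
        (fun p => p.1 == k)).map (·.2))
      = if 0 ≤ r + k ∧ r + k < cols then [pvCell grid r (r + k)] else [] := by
  rw [List.filter_map, List.map_map]
  rw [List.filter_congr (q := fun c => decide (c = r + k))
        (by intro c _; rw [Bool.eq_iff_iff]; simp; omega)]
  rw [filter_pyRange_single cols (r + k)]
  split_ifs with h <;> simp

-- a row's slice of B's "up" bucket k: the single cell (r, k-r) when it is in range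
theorem row_slice_up (grid : List String) (cols r k : Int) :
    ((((PySem.List.pyRange 0 cols 1).map (fun c => (r + c, pvCell grid r c))).filter
        (fun p => p.1 == k)).map (·.2))
      = if 0 ≤ k - r ∧ k - r < cols then [pvCell grid r (k - r)] else [] := by
  rw [List.filter_map, List.map_map]
  rw [List.filter_congr (q := fun c => decide (c = k - r))
        (by intro c _; rw [Bool.eq_iff_iff]; simp; omega)]
  rw [filter_pyRange_single cols (k - r)]
  split_ifs with h <;> simp

-- B's "down" dict at key k is exactly A's inner scan for diagonal offset k
theorem down_dict (grid : List String) (rows cols k : Int) :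
    ((PySem.List.pyRange 0 rows 1).foldl (fun d r =>
        (PySem.List.pyRange 0 cols 1).foldl
          (fun d c => d.modify (c - r) [] (· ++ [pvCell grid r c])) d)
      (PySem.Dict.empty : PySem.Dict Int (List String))).getD k []
    = (PySem.List.pyRange 0 rows 1).foldl (fun diag r =>
        if 0 ≤ r + k ∧ r + k < cols then diag ++ [pvCell grid r (r + k)] else diag) [] := by
  have hP : (PySem.List.pyRange 0 rows 1).foldl (fun d r =>
        (PySem.List.pyRange 0 cols 1).foldl
          (fun d c => d.modify (c - r) [] (· ++ [pvCell grid r c])) d)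
      (PySem.Dict.empty : PySem.Dict Int (List String))
    = ((PySem.List.pyRange 0 rows 1).flatMap (fun r =>
          (PySem.List.pyRange 0 cols 1).map (fun c => (c - r, pvCell grid r c)))).foldl
        (fun d p => d.modify p.1 [] (· ++ [p.2])) PySem.Dict.empty := by
    rw [List.foldl_flatMap]
    simp only [List.foldl_map]
  rw [hP, PySem.Dict.getD_foldl_modify_append, PySem.Dict.getD_empty, List.nil_append,
    List.filter_flatMap, List.map_flatMap]
  simp only [row_slice_down]
  rw [flatMap_ite_singleton (fun r => 0 ≤ r + k ∧ r + k < cols) (fun r => pvCell grid r (r + k)),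
    foldl_append_ite (fun r => 0 ≤ r + k ∧ r + k < cols) (fun r => pvCell grid r (r + k)),
    List.nil_append]

-- B's "up" dict at key k is exactly A's inner scan for anti-diagonal k
theorem up_dict (grid : List String) (rows cols k : Int) :
    ((PySem.List.pyRange 0 rows 1).foldl (fun d r =>
        (PySem.List.pyRange 0 cols 1).foldl
          (fun d c => d.modify (r + c) [] (· ++ [pvCell grid r c])) d)
      (PySem.Dict.empty : PySem.Dict Int (List String))).getD k []
    = (PySem.List.pyRange 0 rows 1).foldl (fun diag r =>
        if 0 ≤ k - r ∧ k - r < cols then diag ++ [pvCell grid r (k - r)] else diag) [] := by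
  have hP : (PySem.List.pyRange 0 rows 1).foldl (fun d r =>
        (PySem.List.pyRange 0 cols 1).foldl
          (fun d c => d.modify (r + c) [] (· ++ [pvCell grid r c])) d)
      (PySem.Dict.empty : PySem.Dict Int (List String))
    = ((PySem.List.pyRange 0 rows 1).flatMap (fun r =>
          (PySem.List.pyRange 0 cols 1).map (fun c => (r + c, pvCell grid r c)))).foldl
        (fun d p => d.modify p.1 [] (· ++ [p.2])) PySem.Dict.empty := by
    rw [List.foldl_flatMap]
    simp only [List.foldl_map]
  rw [hP, PySem.Dict.getD_foldl_modify_append, PySem.Dict.getD_empty, List.nil_append,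
    List.filter_flatMap, List.map_flatMap]
  simp only [row_slice_up]
  rw [flatMap_ite_singleton (fun r => 0 ≤ k - r ∧ k - r < cols) (fun r => pvCell grid r (k - r)),
    foldl_append_ite (fun r => 0 ≤ k - r ∧ k - r < cols) (fun r => pvCell grid r (k - r)),
    List.nil_append]

-- ===== VERDICT (by name: the statement is the Claim_ definition above) =====
theorem diagonal_traversal_spec : Claim_equal_diagonal_traversal := by
  intro grid _ _
  unfold Spec_diagonal_traversal diagonal_traversal diagonal_traversal_alt
  by_cases hg : grid.length = 0 ∨ (grid.headD "").toList.length = 0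
  · rw [if_pos hg, if_pos hg]
  · rw [if_neg hg, if_neg hg]
    simp only [pair_fold_split, down_dict, up_dict,
      PySem.List.foldl_append_singleton_eq_map, List.nil_append]
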